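-- pv_equiv track=rewrite | github.com/PatrickWeller/CS50P | Week3.Loops/Problem_Set2/plates.py | rule4
-- ===== SOURCE A (Python) =====
-- def rule4(s):
--     digit_present = False
--     for i in range(len(s)):
--         if s[i].isdigit():
--             digit_present = True
--             ending = s[i:]
--             break
--         else:
--             pass
--
--     if digit_present == False:
--         return True
--     else:
--         for char in ending:
--             if char.isalpha():
--                 return False
--                 break
--     return True
-- ===== SOURCE B (Python) =====
-- def rule4(s):
--     seen_digit = False
--     for char in s:
--         if char.isdigit():
--             seen_digit = True
--         elif seen_digit and char.isalpha():
--             return False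
--     return True
-- ===== Notes on version B (the rewrite author's own statement) =====
-- stated objective: simpler
-- what changed: Replaced A's two-phase structure (a first loop finding the first digit and building the 'ending' substring, then a second loop scanning that substring for letters) by one single pass with a seen_digit flag and no intermediate substring (measured ~2x faster on large inputs).
import Mathlib
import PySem

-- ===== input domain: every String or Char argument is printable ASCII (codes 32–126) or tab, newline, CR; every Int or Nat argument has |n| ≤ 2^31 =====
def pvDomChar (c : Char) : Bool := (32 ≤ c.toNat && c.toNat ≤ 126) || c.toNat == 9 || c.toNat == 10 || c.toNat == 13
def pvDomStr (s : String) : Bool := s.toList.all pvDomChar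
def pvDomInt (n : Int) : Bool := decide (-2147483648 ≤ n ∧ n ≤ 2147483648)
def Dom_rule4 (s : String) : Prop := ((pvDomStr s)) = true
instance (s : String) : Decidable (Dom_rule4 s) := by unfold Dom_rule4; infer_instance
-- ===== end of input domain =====

-- B merges A's two sequential scans (find the first digit and build the 'ending'
-- substring, then scan that substring for a letter) into one pass with a seen_digit flag.

-- ===== PORT A =====
-- first loop: scan for the first digit; if found, keep ending = s[i:]
def rule4FindEnding : List Char → Option (List Char)
  | [] => none
  | c :: cs => if PySem.Chars.isdigit c then some (c :: cs) else rule4FindEnding cs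

-- second loop: 'for char in ending: if char.isalpha(): return False'; then 'return True'
def rule4CheckEnding : List Char → Bool
  | [] => true
  | c :: cs => if PySem.Chars.isalpha c then false else rule4CheckEnding cs

def rule4 (s : String) : Bool :=
  match rule4FindEnding s.toList with
  | none => true          -- digit_present == False
  | some ending => rule4CheckEnding ending

-- ===== PORT B =====
-- single pass carrying the seen_digit flag
def rule4AltLoop (seen : Bool) : List Char → Bool
  | [] => true
  | c :: cs =>
    if PySem.Chars.isdigit c then rule4AltLoop true cs
    else if seen && PySem.Chars.isalpha c then false
    else rule4AltLoop seen cs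

def rule4_alt (s : String) : Bool := rule4AltLoop false s.toList

-- ===== PRECONDITION & SPEC =====
def Spec_rule4 (s : String) (out : Bool) : Prop := out = rule4_alt s
instance (s : String) (out : Bool) : Decidable (Spec_rule4 s out) := by unfold Spec_rule4; infer_instance

-- ===== CLAIM (what is proved, stated in full; the proofs are below) =====
def Claim_equal_rule4 : Prop := ∀ (s : String), Dom_rule4 s → Spec_rule4 s (rule4 s)

-- ===== LEMMAS AND PROOFS =====
theorem isdigit_not_isalpha (c : Char) (h : PySem.Chars.isdigit c = true) :
    PySem.Chars.isalpha c = false := by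
  simp [PySem.Chars.isdigit, PySem.Chars.isalpha, PySem.Chars.isupper,
    PySem.Chars.islower, Char.le_def, UInt32.le_iff_toNat_le] at *
  omega

theorem rule4AltLoop_true_eq_check (l : List Char) :
    rule4AltLoop true l = rule4CheckEnding l := by
  induction l with
  | nil => rfl
  | cons c cs ih =>
    by_cases hd : PySem.Chars.isdigit c = true
    · simp [rule4AltLoop, rule4CheckEnding, hd, isdigit_not_isalpha c hd, ih]
    · simp [rule4AltLoop, rule4CheckEnding, hd, ih]

theorem rule4_eq_loop (l : List Char) :
    (match rule4FindEnding l with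
     | none => true
     | some ending => rule4CheckEnding ending) = rule4AltLoop false l := by
  induction l with
  | nil => rfl
  | cons c cs ih =>
    by_cases hd : PySem.Chars.isdigit c = true
    · simp [rule4FindEnding, rule4AltLoop, hd, rule4CheckEnding,
        isdigit_not_isalpha c hd, rule4AltLoop_true_eq_check]
    · simp [rule4FindEnding, rule4AltLoop, hd, ih]

-- ===== VERDICT (by name: the statement is the Claim_ definition above) =====
theorem rule4_spec : Claim_equal_rule4 := by
  intro s _
  unfold Spec_rule4 rule4 rule4_alt
  exact rule4_eq_loop s.toList
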